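-- pv_equiv track=rewrite | github.com/boblio-max/origindevtools | origin_cli/tools/fmt.py | _format_python
-- ===== SOURCE A (Python) =====
-- def _format_python(text: str) -> str:
--     lines = text.splitlines()
--     result = [line.rstrip() for line in lines]
--     cleaned = []
--     blank_count = 0
--     for line in result:
--         if line == "":
--             blank_count += 1
--             if blank_count <= 2:
--                 cleaned.append(line)
--         else:
--             blank_count = 0
--             cleaned.append(line)
--     out = "\n".join(cleaned)
--     if not out.endswith("\n"):
--         out += "\n"
--     return out
-- ===== SOURCE B (Python) =====
-- def _format_python(text: str) -> str:
--     stripped = [line.rstrip() for line in text.splitlines()]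
--     cleaned = []
--     pos = 0
--     n = len(stripped)
--     while pos < n:
--         i = pos
--         if stripped[pos] == "":
--             while i < n and stripped[i] == "":
--                 i += 1
--             cleaned.extend([""] * min(i - pos, 2))
--         else:
--             while i < n and stripped[i] != "":
--                 i += 1
--             cleaned.extend(stripped[pos:i])
--         pos = i
--     out = "\n".join(cleaned)
--     if not out.endswith("\n"):
--         out += "\n"
--     return out
-- ===== Notes on version B (the rewrite author's own statement) =====
-- stated objective: alternative
-- what changed: Replaces A's per-line blank_count state machine with run-grouping: scan each maximal run of blank/non-blank lines at once, emitting min(run,2) blanks per blank run.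
import Mathlib
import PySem

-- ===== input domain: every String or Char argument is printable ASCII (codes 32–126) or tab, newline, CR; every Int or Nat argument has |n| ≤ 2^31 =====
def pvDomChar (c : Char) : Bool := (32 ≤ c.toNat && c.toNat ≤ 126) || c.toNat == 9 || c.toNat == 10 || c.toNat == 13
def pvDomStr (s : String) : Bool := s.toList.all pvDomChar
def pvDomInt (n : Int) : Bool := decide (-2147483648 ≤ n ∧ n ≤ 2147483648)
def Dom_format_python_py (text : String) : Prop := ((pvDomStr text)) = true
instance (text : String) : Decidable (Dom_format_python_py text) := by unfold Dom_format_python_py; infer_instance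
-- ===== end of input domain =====

-- B replaces A's per-line blank_count state machine by grouping maximal runs of blank/non-blank lines (alternative decomposition, same cost).

-- ===== PORT A =====
def format_python_py (text : String) : String :=
  let lines := PySem.Str.splitlines text
  let result := lines.map (fun line => PySem.Str.rstrip line)
  let st := result.foldl
    (fun (st : List String × Int) line =>
      if line == "" then
        let b := st.2 + 1
        if b ≤ 2 then (st.1 ++ [line], b) else (st.1, b)
      else (st.1 ++ [line], 0))
    ([], 0)
  let out := PySem.Str.join "\n" st.1
  if PySem.Str.endswith out "\n" then out else out ++ "\n"

-- ===== PORT B =====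
-- Source B walks the line list with an index pos; the port represents the unprocessed suffix stripped[pos:]
-- as a list. inner `while i < n and stripped[i] == ""` of Source B: i - pos = count of leading blank lines
def leadBlanks : List String → Nat
  | [] => 0
  | l :: t => if l == "" then leadBlanks t + 1 else 0

-- inner `while i < n and stripped[i] != ""` of Source B: i - pos = count of leading non-blank lines
def leadNonblanks : List String → Nat
  | [] => 0
  | l :: t => if l == "" then 0 else leadNonblanks t + 1

-- outer `while pos < n:` loop of Source B; stripped[pos:i] / advancing pos to i are take / drop on the suffix
def fmtAltLoop (rest : List String) : List String :=
  match rest with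
  | [] => []
  | l :: t =>
    if l == "" then
      List.replicate (min (leadBlanks (l :: t)) 2) "" ++ fmtAltLoop ((l :: t).drop (leadBlanks (l :: t)))
    else
      (l :: t).take (leadNonblanks (l :: t)) ++ fmtAltLoop ((l :: t).drop (leadNonblanks (l :: t)))
  termination_by rest.length
  decreasing_by
  · simp only [leadBlanks, if_pos ‹_›, List.length_drop, List.length_cons]; omega
  · simp only [leadNonblanks, if_neg ‹_›, List.length_drop, List.length_cons]; omega

def format_python_py_alt (text : String) : String :=
  let stripped := (PySem.Str.splitlines text).map (fun line => PySem.Str.rstrip line)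
  let cleaned := fmtAltLoop stripped
  let out := PySem.Str.join "\n" cleaned
  if PySem.Str.endswith out "\n" then out else out ++ "\n"

-- ===== PRECONDITION & SPEC =====
def Spec_format_python_py (text : String) (out : String) : Prop := out = format_python_py_alt text
instance (text : String) (out : String) : Decidable (Spec_format_python_py text out) := by unfold Spec_format_python_py; infer_instance

-- ===== CLAIM (what is proved, stated in full; the proofs are below) =====
def Claim_equal_format_python_py : Prop := ∀ (text : String), Dom_format_python_py text → Spec_format_python_py text (format_python_py text)

-- ===== LEMMAS AND PROOFS =====

-- recursive characterisation of A's fold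
def loopA : List String → Int → List String
  | [], _ => []
  | l :: rest, b =>
    if l == "" then (if b + 1 ≤ 2 then [l] else []) ++ loopA rest (b + 1)
    else l :: loopA rest 0

theorem foldl_eq_loopA (ls : List String) (acc : List String) (b : Int) :
    (ls.foldl
      (fun (st : List String × Int) line =>
        if line == "" then
          let b := st.2 + 1
          if b ≤ 2 then (st.1 ++ [line], b) else (st.1, b)
        else (st.1 ++ [line], 0))
      (acc, b)).1 = acc ++ loopA ls b := by
  induction ls generalizing acc b with
  | nil => simp [loopA]
  | cons l rest ih =>
    rw [List.foldl_cons]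
    by_cases hl : (l == "") = true
    · rw [if_pos hl]
      by_cases hb : b + 1 ≤ 2
      · have hstep : (let b_1 := ((acc, b) : List String × Int).2 + 1;
            if b_1 ≤ 2 then ((acc, b).1 ++ [l], b_1) else ((acc, b).1, b_1)) = (acc ++ [l], b + 1) := by
          simp [hb]
        rw [hstep, ih, List.append_assoc]
        simp [loopA, hl, hb]
      · have hstep : (let b_1 := ((acc, b) : List String × Int).2 + 1;
            if b_1 ≤ 2 then ((acc, b).1 ++ [l], b_1) else ((acc, b).1, b_1)) = (acc, b + 1) := by
          simp [hb]
        rw [hstep, ih]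
        simp [loopA, hl, hb]
    · rw [if_neg hl, ih, List.append_assoc]
      simp [loopA, hl]

theorem loopA_blanks (k : Nat) (rest : List String) (b : Int) (hb : 0 ≤ b) :
    loopA (List.replicate k "" ++ rest) b
      = List.replicate (min k (2 - b).toNat) "" ++ loopA rest (b + k) := by
  induction k generalizing b with
  | zero => simp
  | succ k ih =>
    rw [List.replicate_succ, List.cons_append]
    show (if b + 1 ≤ 2 then [("" : String)] else []) ++ loopA (List.replicate k "" ++ rest) (b + 1) = _
    rw [ih (b + 1) (by omega)]
    have h2 : (if b + 1 ≤ 2 then [("" : String)] else []) = List.replicate (if b + 1 ≤ 2 then 1 else 0) "" := by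
      split <;> rfl
    have h1 : min (k + 1) (2 - b).toNat = (if b + 1 ≤ 2 then 1 else 0) + min k (2 - (b + 1)).toNat := by
      split <;> omega
    have h3 : b + 1 + (k : Int) = b + ((k : Int) + 1) := by ring
    rw [h2, h1, List.replicate_add, List.append_assoc, h3]
    push_cast
    rfl

theorem loopA_nonblanks (run : List String) (hrun : ∀ l ∈ run, l ≠ "") (rest : List String) :
    loopA (run ++ rest) 0 = run ++ loopA rest 0 := by
  induction run with
  | nil => simp
  | cons l t ih =>
    have hl : ¬ ((l == "") = true) := by simpa using hrun l (by simp)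
    rw [List.cons_append]
    show (if l == "" then _ else l :: loopA (t ++ rest) 0) = _
    rw [if_neg hl, ih (fun x hx => hrun x (by simp [hx])), List.cons_append]

theorem loopA_reset (rest : List String) (b : Int)
    (h : rest = [] ∨ ∃ l t, rest = l :: t ∧ l ≠ "") :
    loopA rest b = loopA rest 0 := by
  rcases h with h | ⟨l, t, h, hl⟩
  · simp [h, loopA]
  · subst h
    show (if l == "" then _ else _) = (if l == "" then _ else _)
    rw [if_neg (by simpa using hl), if_neg (by simpa using hl)]

theorem take_leadBlanks (ls : List String) :
    ls.take (leadBlanks ls) = List.replicate (leadBlanks ls) "" := by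
  induction ls with
  | nil => simp [leadBlanks]
  | cons l t ih =>
    by_cases hl : (l == "") = true
    · have : l = "" := by simpa using hl
      subst this
      simp [leadBlanks, List.replicate_succ, ih]
    · simp [leadBlanks, hl]

theorem drop_leadBlanks_shape (ls : List String) :
    ls.drop (leadBlanks ls) = [] ∨ ∃ l t, ls.drop (leadBlanks ls) = l :: t ∧ l ≠ "" := by
  induction ls with
  | nil => left; simp
  | cons l t ih =>
    show (l :: t).drop (if l == "" then leadBlanks t + 1 else 0) = [] ∨
      ∃ l' t', (l :: t).drop (if l == "" then leadBlanks t + 1 else 0) = l' :: t' ∧ l' ≠ ""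
    by_cases hl : (l == "") = true
    · simpa [hl] using ih
    · right; exact ⟨l, t, by simp [hl], by simpa using hl⟩

theorem take_leadNonblanks (ls : List String) :
    ∀ x ∈ ls.take (leadNonblanks ls), x ≠ "" := by
  induction ls with
  | nil => simp [leadNonblanks]
  | cons l t ih =>
    show ∀ x ∈ (l :: t).take (if l == "" then 0 else leadNonblanks t + 1), x ≠ ""
    by_cases hl : (l == "") = true
    · simp [hl]
    · intro x hx
      rw [if_neg hl, List.take_succ_cons] at hx
      rcases List.mem_cons.mp hx with h | h
      · subst h; simpa using hl
      · exact ih x h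
theorem loopA_eq_fmtAltLoop (ls : List String) : loopA ls 0 = fmtAltLoop ls := by
  fun_induction fmtAltLoop ls with
  | case1 => simp [loopA]
  | case2 l t hl ih =>
    have hsplit : (l :: t) = List.replicate (leadBlanks (l :: t)) "" ++ (l :: t).drop (leadBlanks (l :: t)) := by
      conv_lhs => rw [← List.take_append_drop (leadBlanks (l :: t)) (l :: t)]
      rw [take_leadBlanks]
    conv_lhs => rw [hsplit]
    rw [loopA_blanks _ _ 0 le_rfl,
        loopA_reset _ _ (drop_leadBlanks_shape (l :: t)), ih]
    rfl
  | case3 l t hl ih =>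
    have hsplit : (l :: t) = (l :: t).take (leadNonblanks (l :: t)) ++ (l :: t).drop (leadNonblanks (l :: t)) := by
      rw [List.take_append_drop]
    conv_lhs => rw [hsplit]
    rw [loopA_nonblanks _ (take_leadNonblanks (l :: t)) _, ih]

-- ===== VERDICT (by name: the statement is the Claim_ definition above) =====
theorem format_python_py_spec : Claim_equal_format_python_py := by
  intro text _
  unfold Spec_format_python_py format_python_py format_python_py_alt
  simp only
  rw [foldl_eq_loopA, List.nil_append, loopA_eq_fmtAltLoop]
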